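-- pv_equiv track=rewrite | github.com/NobylPistachio/dailyCoding | #70(Easy).py | list_setup
-- ===== SOURCE A (Python) =====
-- def list_setup(limit:int) -> list:
--     perfect_numbers:list = []
--     #while I done have 5 numbers in this list I don't want it to stop
--     num:int=0
--     while len(perfect_numbers) <= (limit):
--
--         #check if number is a perfect number
--         num_to_list = [int(number) for number in list(str(num))]
--         sum_10:int = 0
--         for elem in num_to_list:
--             sum_10 += elem
--         if sum_10 == 10:
--             perfect_numbers.append(num)
--
--         if len(perfect_numbers) > limit:
--             break
--
--         num+=1
--
--     return perfect_numbers
-- ===== SOURCE B (Python) =====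
-- def list_setup(limit: int) -> list:
--     # For every prefix p >= 1, there is at most one last digit d with
--     # digitsum(10*p + d) == 10, namely d = 10 - digitsum(p) when 0 <= d <= 9.
--     # So scan prefixes instead of all integers (about 10x fewer candidates).
--     res = []
--     if limit < 0:
--         return res
--     need = limit + 1
--     p = 1
--     while len(res) < need:
--         s = 0
--         q = p
--         while q > 0:
--             s += q % 10
--             q //= 10
--         if 1 <= s <= 10:
--             res.append(p * 10 + (10 - s))
--         p += 1
--     return res
-- ===== Notes on version B (the rewrite author's own statement) =====
-- stated objective: faster
-- what changed: Instead of testing every integer's string-digit sum, B scans only the 10x-smaller space of prefixes p and derives the unique valid last digit 10 - digitsum(p) arithmetically, emitting 10*p + (10 - digitsum(p)) whenever 1 <= digitsum(p) <= 10.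
import Mathlib
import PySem

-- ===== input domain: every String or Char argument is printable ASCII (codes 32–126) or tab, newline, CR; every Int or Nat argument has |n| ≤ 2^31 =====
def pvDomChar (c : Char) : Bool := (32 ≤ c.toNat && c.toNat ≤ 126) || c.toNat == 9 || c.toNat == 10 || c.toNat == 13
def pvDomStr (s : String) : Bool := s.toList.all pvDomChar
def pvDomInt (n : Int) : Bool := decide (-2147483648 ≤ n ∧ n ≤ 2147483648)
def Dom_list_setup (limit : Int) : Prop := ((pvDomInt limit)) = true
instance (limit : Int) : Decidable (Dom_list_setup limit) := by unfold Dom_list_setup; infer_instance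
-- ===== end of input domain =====

-- B scans only prefixes p and appends the unique valid last digit 10 - digitsum(p) instead of
-- testing the string-digit sum of every integer (objective: faster — measurably so in the
-- timing run — ~10x fewer candidates and no string conversion).

-- ===== PORT A =====
-- A's sum_10: [int(number) for number in list(str(num))], summed; int(c) never raises here
-- (every c is a decimal digit of str(num)), the .getD 0 only totalizes that dead branch.
def pvSumA (num : Int) : Int :=
  (((PySem.Int.toChars num).map (fun c => (PySem.Int.ofChars? [c]).getD 0)).foldl (· + ·) 0)

-- A's while loop, with fuel 20 * 10^limit.toNat: the fuel provably exceeds the final value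
-- of num (the (k+1)-th number with digit sum 10 is at most 19 * 10^k), so the loop always
-- ends through its own condition/break, never by exhausting fuel.
def pvLoopA : Nat → Int → List Int → Int → List Int
  | 0, _, acc, _ => acc
  | f + 1, limit, acc, num =>
    if (acc.length : Int) ≤ limit then
      let acc' := if pvSumA num = 10 then acc ++ [num] else acc
      if (acc'.length : Int) > limit then acc'
      else pvLoopA f limit acc' (num + 1)
    else acc

def list_setup (limit : Int) : List Int :=
  pvLoopA (20 * 10 ^ limit.toNat) limit [] 0

-- ===== PORT B =====
-- B's inner digit-sum loop: while q > 0: s += q % 10; q //= 10  (on a nonnegative counter)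
def pvDsum (q : Nat) : Nat :=
  if q = 0 then 0 else q % 10 + pvDsum (q / 10)
decreasing_by exact Nat.div_lt_self (by omega) (by omega)

-- B's outer while loop; same sufficient fuel bound, likewise never exhausted.
def pvLoopB : Nat → Int → List Int → Nat → List Int
  | 0, _, acc, _ => acc
  | f + 1, need, acc, p =>
    if (acc.length : Int) < need then
      let s := pvDsum p
      let acc' := if 1 ≤ s ∧ s ≤ 10 then acc ++ [((10 * p + (10 - s) : Nat) : Int)] else acc
      pvLoopB f need acc' (p + 1)
    else acc

def list_setup_alt (limit : Int) : List Int :=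
  if limit < 0 then [] else pvLoopB (20 * 10 ^ limit.toNat) (limit + 1) [] 1

-- ===== PRECONDITION & SPEC =====
def Spec_list_setup (limit : Int) (out : List Int) : Prop := out = list_setup_alt limit
instance (limit : Int) (out : List Int) : Decidable (Spec_list_setup limit out) := by unfold Spec_list_setup; infer_instance

-- ===== CLAIM (what is proved, stated in full; the proofs are below) =====
def Claim_equal_list_setup : Prop := ∀ (limit : Int), Dom_list_setup limit → Spec_list_setup limit (list_setup limit)

-- ===== LEMMAS AND PROOFS =====

-- the numbers with digit sum 10, resp. B's valid prefixes, inside a list of naturals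
def pvFilterA (l : List Nat) : List Nat := l.filter (fun n => pvDsum n = 10)
def pvFilterB (l : List Nat) : List Nat := l.filter (fun q => 1 ≤ pvDsum q ∧ pvDsum q ≤ 10)
-- the number B emits for a valid prefix q
def pvG (q : Nat) : Nat := 10 * q + (10 - pvDsum q)

-- str(n) for n ≥ 0 as a recursion on the number (big-endian digits)
def pvDchars (n : Nat) : List Char :=
  if n < 10 then [Nat.digitChar n] else pvDchars (n / 10) ++ [Nat.digitChar (n % 10)]
decreasing_by exact Nat.div_lt_self (by omega) (by omega)

theorem pvDsum_small {n : Nat} (h : n < 10) : pvDsum n = n := by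
  rcases Nat.eq_zero_or_pos n with h0 | h0
  · simp [pvDsum, h0]
  · rw [pvDsum]
    simp [Nat.pos_iff_ne_zero.mp h0, Nat.mod_eq_of_lt h, Nat.div_eq_of_lt h, pvDsum]

theorem pvDsum_step (q d : Nat) (hd : d < 10) : pvDsum (10 * q + d) = pvDsum q + d := by
  rcases Nat.eq_zero_or_pos q with h0 | h0
  · subst h0; simp [pvDsum_small hd, pvDsum]
  · rw [pvDsum]
    have h1 : ¬ (10 * q + d = 0) := by omega
    have hm : (10 * q + d) % 10 = d := by omega
    have hq : (10 * q + d) / 10 = q := by omega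
    rw [if_neg h1, hm, hq]; omega

theorem pvToDigitsCore_eq (f : Nat) : ∀ n acc, n < f →
    Nat.toDigitsCore 10 f n acc = pvDchars n ++ acc := by
  induction f with
  | zero => intro n acc h; omega
  | succ f ih =>
    intro n acc h
    rw [Nat.toDigitsCore]
    by_cases h10 : n < 10
    · have : n / 10 = 0 := Nat.div_eq_of_lt h10
      simp [this, pvDchars, h10, Nat.mod_eq_of_lt h10]
    · have hne : ¬ (n / 10 = 0) := by intro h0; exact h10 (by omega : n < 10)
      rw [if_neg hne]
      rw [ih (n / 10) _ (by omega)]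
      conv_rhs => rw [pvDchars, if_neg h10]
      simp

theorem pvCharVal {d : Nat} (h : d < 10) :
    (PySem.Int.ofChars? [Nat.digitChar d]).getD 0 = (d : Int) := by
  interval_cases d <;> decide

theorem pvFoldlAdd (l : List Int) (a : Int) : l.foldl (· + ·) a = a + l.sum := by
  induction l generalizing a with
  | nil => simp
  | cons x xs ihx => simp [List.foldl, ihx]; ring

theorem pvDcharsSum (n : Nat) :
    ((pvDchars n).map (fun c => (PySem.Int.ofChars? [c]).getD 0)).sum = (pvDsum n : Int) := by
  by_cases h10 : n < 10
  · rw [pvDchars, if_pos h10]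
    simp [pvCharVal h10, pvDsum_small h10]
  · rw [pvDchars, if_neg h10, pvDsum, if_neg (by omega : ¬ n = 0)]
    have ih := pvDcharsSum (n / 10)
    simp [ih, pvCharVal (Nat.mod_lt n (by omega) : n % 10 < 10)]
    ring
decreasing_by exact Nat.div_lt_self (by omega) (by omega)

theorem pvSumA_eq (n : Nat) : pvSumA (n : Int) = (pvDsum n : Int) := by
  have hneg : ¬ ((n : Int) < 0) := by omega
  rw [pvSumA, PySem.Int.toChars, if_neg hneg, Int.toNat_natCast, Nat.toDigits,
      pvToDigitsCore_eq (n + 1) n [] (by omega), List.append_nil, pvFoldlAdd,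
      pvDcharsSum]
  simp

theorem pvBlock (q : Nat) :
    pvFilterA (List.range' (10 * q) 10) =
      if 1 ≤ pvDsum q ∧ pvDsum q ≤ 10 then [pvG q] else [] := by
  have hl : List.range' (10 * q) 10 =
      [10*q+0, 10*q+1, 10*q+2, 10*q+3, 10*q+4, 10*q+5, 10*q+6, 10*q+7, 10*q+8, 10*q+9] := by
    simp [List.range']
  rw [pvFilterA, hl]
  simp only [List.filter, pvDsum_step q 0 (by norm_num), pvDsum_step q 1 (by norm_num),
    pvDsum_step q 2 (by norm_num), pvDsum_step q 3 (by norm_num), pvDsum_step q 4 (by norm_num),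
    pvDsum_step q 5 (by norm_num), pvDsum_step q 6 (by norm_num), pvDsum_step q 7 (by norm_num),
    pvDsum_step q 8 (by norm_num), pvDsum_step q 9 (by norm_num)]
  by_cases hle : pvDsum q ≤ 10
  · set s := pvDsum q with hs
    rw [pvG, ← hs]
    interval_cases s <;> simp
  · rw [if_neg (by omega)]
    have h10 : ∀ d : Nat, (pvDsum q + d = 10) = False := by intro d; simp; omega
    have h0 : (pvDsum q = 10) = False := by simp; omega
    simp [h10, h0]

theorem pvMain (M : Nat) :
    pvFilterA (List.range' 0 (10 * M)) = (pvFilterB (List.range' 0 M)).map pvG := by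
  induction M with
  | zero => simp [pvFilterA, pvFilterB]
  | succ M ih =>
    have hA : List.range' 0 (10 * (M + 1)) = List.range' 0 (10 * M) ++ List.range' (10 * M) 10 := by
      have := List.range'_append (s := 0) (m := 10 * M) (n := 10) (step := 1)
      simp at this
      rw [this]
      ring_nf
    have hB : List.range' 0 (M + 1) = List.range' 0 M ++ [M] := by
      have := List.range'_append (s := 0) (m := M) (n := 1) (step := 1)
      simp at this
      rw [this]
    rw [hA, hB, pvFilterA, pvFilterB, List.filter_append, List.filter_append, List.map_append,
        ← pvFilterA, ← pvFilterB, ← pvFilterA, ← pvFilterB, ih, pvBlock M]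
    congr 1
    by_cases h : 1 ≤ pvDsum M ∧ pvDsum M ≤ 10
    · rw [if_pos h, pvFilterB]
      simp [List.filter, h.1, h.2]
    · rw [if_neg h, pvFilterB]
      rcases Decidable.not_and_iff_or_not.mp h with h' | h' <;> simp [List.filter, h']

theorem pvDsum_19 (j : Nat) : pvDsum (19 * 10 ^ j) = 10 := by
  induction j with
  | zero =>
    norm_num
    rw [pvDsum]; norm_num
    rw [pvDsum]; norm_num
    rw [pvDsum]; norm_num
  | succ j ih =>
    have : 19 * 10 ^ (j + 1) = 10 * (19 * 10 ^ j) + 0 := by ring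
    rw [this, pvDsum_step _ 0 (by norm_num), ih]

theorem pvCount (e : Nat) : e + 1 ≤ (pvFilterA (List.range' 0 (20 * 10 ^ e))).length := by
  have hsub : ((List.range (e + 1)).map (fun j => 19 * 10 ^ j)) ⊆
      pvFilterA (List.range' 0 (20 * 10 ^ e)) := by
    intro m hm
    simp only [List.mem_map, List.mem_range] at hm
    obtain ⟨j, hj, rfl⟩ := hm
    rw [pvFilterA, List.mem_filter]
    constructor
    · rw [List.mem_range'_1]
      have h1 : (10:Nat) ^ j ≤ 10 ^ e := Nat.pow_le_pow_right (by norm_num) (by omega)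
      have h2 : (0:Nat) < 10 ^ e := Nat.pow_pos (by norm_num : (0:Nat) < 10)
      omega
    · simp [pvDsum_19 j]
  have hnd : ((List.range (e + 1)).map (fun j => 19 * 10 ^ j)).Nodup := by
    refine List.Nodup.map ?_ (List.nodup_range)
    intro a b hab
    replace hab : 19 * 10 ^ a = 19 * 10 ^ b := hab
    exact Nat.pow_right_injective (by norm_num : 2 ≤ 10) (show (10:Nat) ^ a = 10 ^ b by omega)
  have := List.Subperm.length_le (List.subperm_of_subset hnd hsub)
  simpa using this

theorem pvLoopA_eq (f : Nat) : ∀ (limit : Int) (acc : List Int) (n : Nat),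
    pvLoopA f limit acc (n : Int) =
      acc ++ ((pvFilterA (List.range' n f)).take ((limit + 1 - acc.length).toNat)).map
        (fun m => Int.ofNat m) := by
  induction f with
  | zero => intro limit acc n; simp [pvLoopA, pvFilterA]
  | succ f ih =>
    intro limit acc n
    rw [pvLoopA]
    by_cases hle : (acc.length : Int) ≤ limit
    · rw [if_pos hle]
      by_cases hhit : pvSumA (n : Int) = 10
      · have hcond : pvDsum n = 10 := by
          have := pvSumA_eq n; rw [hhit] at this; exact_mod_cast this.symm
        have hfilter : pvFilterA (List.range' n (f + 1)) = n :: pvFilterA (List.range' (n + 1) f) := by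
          rw [List.range'_succ, pvFilterA, List.filter_cons]
          simp [hcond, pvFilterA]
        have hk : (limit + 1 - (acc.length : Int)).toNat = (limit - acc.length).toNat + 1 := by
          omega
        rw [hfilter, hk, List.take_succ_cons, List.map_cons]
        simp only [if_pos hhit]
        by_cases hbrk : ((acc ++ [(n : Int)]).length : Int) > limit
        · rw [if_pos hbrk]
          have ht : (limit - (acc.length : Int)).toNat = 0 := by
            simp at hbrk; omega
          simp [ht]
        · rw [if_neg hbrk]
          have heq := ih limit (acc ++ [(n : Int)]) (n + 1)
          push_cast at heq ⊢
          rw [heq]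
          have hk2 : (limit + 1 - ((acc ++ [(n : Int)]).length : Int)).toNat
              = (limit - (acc.length : Int)).toNat := by
            simp only [List.length_append, List.length_cons, List.length_nil]; push_cast; omega
          rw [hk2]
          simp
      · have hcond : ¬ (pvDsum n = 10) := fun hc =>
          hhit (by rw [pvSumA_eq n, hc]; norm_num)
        have hfilter : pvFilterA (List.range' n (f + 1)) = pvFilterA (List.range' (n + 1) f) := by
          rw [List.range'_succ, pvFilterA, List.filter_cons]
          simp [hcond, pvFilterA]
        rw [hfilter]
        simp only [if_neg hhit]
        have hbrk : ¬ ((acc.length : Int) > limit) := by omega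
        rw [if_neg hbrk]
        have heq := ih limit acc (n + 1)
        push_cast at heq ⊢
        rw [heq]
    · rw [if_neg hle]
      have ht : (limit + 1 - (acc.length : Int)).toNat = 0 := by omega
      simp [ht]

theorem pvLoopB_eq (f : Nat) : ∀ (need : Int) (acc : List Int) (p : Nat),
    pvLoopB f need acc p =
      acc ++ ((pvFilterB (List.range' p f)).take ((need - acc.length).toNat)).map
        (fun q => ((pvG q : Nat) : Int)) := by
  induction f with
  | zero => intro need acc p; simp [pvLoopB, pvFilterB]
  | succ f ih =>
    intro need acc p
    rw [pvLoopB]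
    by_cases hlt : (acc.length : Int) < need
    · rw [if_pos hlt]
      by_cases hhit : 1 ≤ pvDsum p ∧ pvDsum p ≤ 10
      · have hfilter : pvFilterB (List.range' p (f + 1)) = p :: pvFilterB (List.range' (p + 1) f) := by
          rw [List.range'_succ, pvFilterB, List.filter_cons]
          simp only [decide_eq_true_eq, if_pos hhit, pvFilterB]
        have hk : (need - (acc.length : Int)).toNat = (need - acc.length - 1).toNat + 1 := by
          omega
        rw [hfilter, hk, List.take_succ_cons, List.map_cons]
        simp only [if_pos hhit]
        have heq := ih need (acc ++ [((10 * p + (10 - pvDsum p) : Nat) : Int)]) (p + 1)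
        rw [heq]
        have hk2 : (need - (((acc ++ [((10 * p + (10 - pvDsum p) : Nat) : Int)]).length : Int))).toNat
            = (need - acc.length - 1).toNat := by
          simp only [List.length_append, List.length_cons, List.length_nil]; push_cast; omega
        rw [hk2]
        simp [pvG]
      · have hfilter : pvFilterB (List.range' p (f + 1)) = pvFilterB (List.range' (p + 1) f) := by
          rw [List.range'_succ, pvFilterB, List.filter_cons]
          simp only [decide_eq_true_eq, if_neg hhit, pvFilterB]
        rw [hfilter]
        simp only [if_neg hhit]
        exact ih need acc (p + 1)
    · rw [if_neg hlt]
      have ht : (need - (acc.length : Int)).toNat = 0 := by omega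
      simp [ht]

-- ===== VERDICT (by name: the statement is the Claim_ definition above) =====
theorem list_setup_spec : Claim_equal_list_setup := by
  unfold Claim_equal_list_setup Spec_list_setup
  intro limit _
  rw [list_setup, list_setup_alt]
  have hA := pvLoopA_eq (20 * 10 ^ limit.toNat) limit [] 0
  simp only [Nat.cast_zero, List.length_nil] at hA
  by_cases hneg : limit < 0
  · rw [if_pos hneg, hA]
    have ht : (limit + 1 - (0 : Int)).toNat = 0 := by omega
    rw [ht]
    simp
  · rw [if_neg hneg, hA, pvLoopB_eq (20 * 10 ^ limit.toNat) (limit + 1) [] 1]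
    simp only [List.length_nil, Nat.cast_zero, List.nil_append]
    have hk : (limit + 1 - (0 : Int)).toNat = limit.toNat + 1 := by omega
    rw [hk]
    set e := limit.toNat
    set F := 20 * 10 ^ e with hF
    have hmap : (pvFilterB (List.range' 1 F)).map pvG = pvFilterA (List.range' 0 (10 * (F + 1))) := by
      have h01 : List.range' 0 (F + 1) = 0 :: List.range' 1 F := List.range'_succ
      have hz : pvFilterB (List.range' 0 (F + 1)) = pvFilterB (List.range' 1 F) := by
        rw [h01, pvFilterB, List.filter_cons]
        have : ¬ (1 ≤ pvDsum 0 ∧ pvDsum 0 ≤ 10) := by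
          rw [pvDsum_small (by norm_num)]; omega
        simp only [decide_eq_true_eq, if_neg this, pvFilterB]
      rw [← hz, pvMain (F + 1)]
    have hsplit : pvFilterA (List.range' 0 (10 * (F + 1)))
        = pvFilterA (List.range' 0 F) ++ pvFilterA (List.range' F (9 * F + 10)) := by
      have hr := List.range'_append (s := 0) (m := F) (n := 9 * F + 10) (step := 1)
      simp only [Nat.zero_add, Nat.one_mul] at hr
      have harith : 10 * (F + 1) = F + (9 * F + 10) := by ring
      simp only [pvFilterA]
      rw [← List.filter_append, hr, harith]
    calc ((pvFilterA (List.range' 0 F)).take (e + 1)).map (fun m => Int.ofNat m)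
        = ((pvFilterA (List.range' 0 (10 * (F + 1)))).take (e + 1)).map (fun m => Int.ofNat m) := by
          rw [hsplit, List.take_append_of_le_length (pvCount e)]
      _ = (((pvFilterB (List.range' 1 F)).map pvG).take (e + 1)).map (fun m => Int.ofNat m) := by
          rw [hmap]
      _ = ((pvFilterB (List.range' 1 F)).take (e + 1)).map (fun q => ((pvG q : Nat) : Int)) := by
          rw [← List.map_take, List.map_map]
          rfl
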